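-- pv_equiv track=rewrite | github.com/dgerritsen-rgb/ToyotaAyvensCompare | src/core/base_scraper.py | filter_vehicles
-- ===== SOURCE A (Python) =====
-- from typing import Dict, List, Optional, Any
--
-- def filter_vehicles(
--
--     vehicles: List[Dict[str, Any]],
--     model: Optional[str] = None,
--     brand: Optional[str] = None,
-- ) -> List[Dict[str, Any]]:
--     """
--     Filter discovered vehicles by model or brand.
--
--     Args:
--         vehicles: List of vehicle dicts from discover_vehicles()
--         model: Filter by model name (case-insensitive substring)
--         brand: Filter by brand name (case-insensitive substring)
--
--     Returns:
--         Filtered list of vehicles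
--     """
--     filtered = vehicles
--
--     if model:
--         model_lower = model.lower()
--         filtered = [
--             v for v in filtered
--             if model_lower in v.get('model', '').lower()
--         ]
--
--     if brand:
--         brand_lower = brand.lower()
--         filtered = [
--             v for v in filtered
--             if brand_lower in v.get('brand', '').lower()
--         ]
--
--     return filtered
-- ===== SOURCE B (Python) =====
-- from typing import Dict, List, Optional, Any
--
-- def filter_vehicles(
--     vehicles: List[Dict[str, Any]],
--     model: Optional[str] = None,
--     brand: Optional[str] = None,
-- ) -> List[Dict[str, Any]]:
--     """Single combined pass: precompute lowered patterns once, keep v when both match."""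
--     model_lower = model.lower() if model else None
--     brand_lower = brand.lower() if brand else None
--     return [
--         v for v in vehicles
--         if (model_lower is None or model_lower in v.get('model', '').lower())
--         and (brand_lower is None or brand_lower in v.get('brand', '').lower())
--     ]
-- ===== Notes on version B (the rewrite author's own statement) =====
-- stated objective: simpler
-- what changed: Replaces A's two sequential filtering passes (one intermediate list per non-empty filter) with a single list comprehension over vehicles using one combined predicate with the lowered patterns precomputed once.
import Mathlib
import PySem

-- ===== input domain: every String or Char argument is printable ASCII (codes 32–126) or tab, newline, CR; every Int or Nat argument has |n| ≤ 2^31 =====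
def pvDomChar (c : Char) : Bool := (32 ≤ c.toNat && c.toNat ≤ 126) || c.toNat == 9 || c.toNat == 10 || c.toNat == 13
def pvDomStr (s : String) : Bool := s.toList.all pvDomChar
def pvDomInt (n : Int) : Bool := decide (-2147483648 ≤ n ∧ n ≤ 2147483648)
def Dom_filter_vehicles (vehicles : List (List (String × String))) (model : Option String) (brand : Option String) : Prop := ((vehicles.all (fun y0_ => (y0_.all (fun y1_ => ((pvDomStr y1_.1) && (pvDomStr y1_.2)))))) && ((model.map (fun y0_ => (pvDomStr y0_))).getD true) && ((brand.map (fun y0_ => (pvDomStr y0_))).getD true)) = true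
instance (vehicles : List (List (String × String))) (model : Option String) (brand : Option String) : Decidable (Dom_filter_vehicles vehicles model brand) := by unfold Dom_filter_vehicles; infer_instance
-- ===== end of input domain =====

-- B replaces A's two sequential filter passes by one combined-predicate pass with the lowered patterns precomputed once (objective: simpler).

-- ===== PORT A =====
-- v.get('model', '') on the association-list dict
def pvGetField (v : List (String × String)) (k : String) : String :=
  PySem.Dict.getD ⟨v⟩ k ""

def filter_vehicles (vehicles : List (List (String × String))) (model : Option String) (brand : Option String) : List (List (String × String)) :=
  let filtered := vehicles
  -- if model:
  let filtered :=
    match model with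
    | none => filtered
    | some m =>
      if m = "" then filtered
      else
        let model_lower := PySem.Str.lower m
        filtered.filter (fun v => PySem.Str.isIn model_lower (PySem.Str.lower (pvGetField v "model")))
  -- if brand:
  let filtered :=
    match brand with
    | none => filtered
    | some b =>
      if b = "" then filtered
      else
        let brand_lower := PySem.Str.lower b
        filtered.filter (fun v => PySem.Str.isIn brand_lower (PySem.Str.lower (pvGetField v "brand")))
  filtered

-- ===== PORT B =====
def filter_vehicles_alt (vehicles : List (List (String × String))) (model : Option String) (brand : Option String) : List (List (String × String)) :=
  -- model_lower = model.lower() if model else None  (and likewise for brand)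
  let model_lower : Option String :=
    match model with
    | none => none
    | some m => if m = "" then none else some (PySem.Str.lower m)
  let brand_lower : Option String :=
    match brand with
    | none => none
    | some b => if b = "" then none else some (PySem.Str.lower b)
  vehicles.filter (fun v =>
    (match model_lower with
     | none => true
     | some ml => PySem.Str.isIn ml (PySem.Str.lower (pvGetField v "model"))) &&
    (match brand_lower with
     | none => true
     | some bl => PySem.Str.isIn bl (PySem.Str.lower (pvGetField v "brand"))))

-- ===== PRECONDITION & SPEC =====
def Spec_filter_vehicles (vehicles : List (List (String × String))) (model : Option String) (brand : Option String) (out : List (List (String × String))) : Prop := out = filter_vehicles_alt vehicles model brand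
instance (vehicles : List (List (String × String))) (model : Option String) (brand : Option String) (out : List (List (String × String))) : Decidable (Spec_filter_vehicles vehicles model brand out) := by unfold Spec_filter_vehicles; infer_instance

-- ===== CLAIM (what is proved, stated in full; the proofs are below) =====
def Claim_equal_filter_vehicles : Prop := ∀ (vehicles : List (List (String × String))) (model : Option String) (brand : Option String), Dom_filter_vehicles vehicles model brand → Spec_filter_vehicles vehicles model brand (filter_vehicles vehicles model brand)

-- ===== LEMMAS AND PROOFS =====

-- ===== VERDICT (by name: the statement is the Claim_ definition above) =====
theorem filter_vehicles_spec : Claim_equal_filter_vehicles := by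
  intro vehicles model brand _
  unfold Spec_filter_vehicles filter_vehicles filter_vehicles_alt
  rcases model with _ | m <;> rcases brand with _ | b <;> simp only []
  · simp
  · by_cases hb : b = "" <;> simp [hb]
  · by_cases hm : m = "" <;> simp [hm]
  · by_cases hm : m = "" <;> by_cases hb : b = "" <;>
      simp [hm, hb, List.filter_filter]
    exact List.filter_congr (fun v _ => Bool.and_comm _ _)
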